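-- pv_equiv track=rewrite | github.com/ModSquad2020/SD_Matt | pipeline/generateWindows.py | generateSub
-- ===== SOURCE A (Python) =====
-- import copy
--
-- def generateSub(original, collection, i):
-- 	'''
-- 	Given a combination and a deepcopied version,
-- 	wrapped in a for loop ranging from 1,
-- 	len(collection) for i
-- 	'''
-- 	base = True
-- 	for item in collection:
-- 		if len(item) > i:#pop the 2nd column
-- 			base=False
-- 			item.pop(i)
--
-- 	cleanCollection = []
-- 	for item in collection:#get rid of the top rows
-- 		if len(item) <= i:
-- 			pass
-- 		else:
-- 			cleanCollection.append(item)
--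
-- 	if base:
-- 		return original
-- 	else:
-- 		original.extend(copy.deepcopy( cleanCollection ))
-- 		return generateSub( original, collection, i )
-- ===== SOURCE B (Python) =====
-- def generateSub(original, collection, i):
--     # Closed-form rounds: snapshot r of A equals, over the pristine collection,
--     # items longer than i+r with columns i..i+r-1 removed.
--     # Return-value equivalent to A; B does not mutate `collection` (A does).
--     maxlen = max((len(item) for item in collection), default=0)
--     for r in range(1, max(maxlen - i, 1)):
--         original.extend(item[:i] + item[i + r:]
--                         for item in collection if len(item) > i + r)
--     return original
-- ===== Notes on version B (the rewrite author's own statement) =====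
-- stated objective: alternative
-- what changed: Replaced A's destructive recursion (pop column i from every row, snapshot, recurse on the mutated collection) with a single closed-form loop over round numbers that reads each snapshot directly off the pristine collection as item[:i]+item[i+r:], with the round count computed from the longest row.
-- outside the precondition, e.g. on generateSub([], [[1]], -1): A raises IndexError, B returns [[1]]; on generateSub([[1]], [], -1): A returns [[1]], B returns [[1]]
import Mathlib
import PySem

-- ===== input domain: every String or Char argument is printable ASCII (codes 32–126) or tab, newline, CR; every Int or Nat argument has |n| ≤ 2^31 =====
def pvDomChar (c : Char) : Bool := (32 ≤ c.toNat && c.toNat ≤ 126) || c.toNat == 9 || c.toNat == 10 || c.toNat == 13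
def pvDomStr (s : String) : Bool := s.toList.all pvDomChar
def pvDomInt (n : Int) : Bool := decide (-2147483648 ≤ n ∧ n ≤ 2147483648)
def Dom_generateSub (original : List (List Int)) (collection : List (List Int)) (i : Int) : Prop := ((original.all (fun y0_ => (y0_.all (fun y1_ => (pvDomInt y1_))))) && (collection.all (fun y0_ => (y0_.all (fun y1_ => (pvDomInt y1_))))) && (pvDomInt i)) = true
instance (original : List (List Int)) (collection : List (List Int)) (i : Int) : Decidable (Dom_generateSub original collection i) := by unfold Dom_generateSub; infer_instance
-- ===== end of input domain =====

-- B replaces A's destructive pop-and-recurse with a closed-form loop over round numbers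
-- on the pristine collection (alternative decomposition); equivalence is about the RETURN
-- value only: A mutates `original` and `collection` in place, B only extends `original`.


-- ===== PORT A =====
-- item.pop(i); the `none` (IndexError) branch is unreachable inside Pre_ (0 ≤ i < len)
def gsPop (item : List Int) (i : Int) : List Int :=
  match PySem.List.pop? item i with
  | some r => r.2
  | none => item

-- first for-loop: flag `base` and the collection after the in-place pops
def gsRound (collection : List (List Int)) (i : Int) : Bool × List (List Int) :=
  collection.foldl
    (fun st item =>
      if (item.length : Int) > i then (false, st.2 ++ [gsPop item i])
      else (st.1, st.2 ++ [item]))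
    (true, [])

-- second for-loop: cleanCollection
def gsClean (collection : List (List Int)) (i : Int) : List (List Int) :=
  collection.foldl
    (fun acc item => if (item.length : Int) ≤ i then acc else acc ++ [item]) []

-- the recursion, fuel-guarded for totality (each recursive call shrinks the total
-- length of `collection` by at least one, so the fuel is never exhausted on Pre_)
def generateSubFuel : Nat → List (List Int) → List (List Int) → Int → List (List Int)
  | 0, original, _, _ => original
  | n+1, original, collection, i =>
    let st := gsRound collection i
    let clean := gsClean st.2 i
    if st.1 then original
    else generateSubFuel n (original ++ clean) st.2 i

def generateSub (original : List (List Int)) (collection : List (List Int)) (i : Int) : List (List Int) :=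
  generateSubFuel (collection.foldl (fun s it => s + it.length) 0 + 1) original collection i

-- ===== PORT B =====
def generateSub_alt (original : List (List Int)) (collection : List (List Int)) (i : Int) : List (List Int) :=
  let maxlen : Int :=
    match PySem.List.max? (collection.map (fun it => (it.length : Int))) (fun x => x) with
    | some m => m
    | none => 0
  (PySem.List.pyRange 1 (max (maxlen - i) 1) 1).foldl
    (fun acc r =>
      acc ++ (collection.filter (fun it => (it.length : Int) > i + r)).map
        (fun it => PySem.List.slice it none (some i) ++ PySem.List.slice it (some (i + r)) none))
    original

-- ===== PRECONDITION & SPEC =====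
-- Pre_ excludes i < 0, where A either diverges or raises IndexError (pop on an emptied item).
def Pre_generateSub (original : List (List Int)) (collection : List (List Int)) (i : Int) : Prop := 0 ≤ i
instance (original : List (List Int)) (collection : List (List Int)) (i : Int) : Decidable (Pre_generateSub original collection i) := by unfold Pre_generateSub; infer_instance
def pvWitness_generateSub : List (List Int) × List (List Int) × Int := ([[1]], [[1, 2, 3], [4]], 1)

def Spec_generateSub (original : List (List Int)) (collection : List (List Int)) (i : Int) (out : List (List Int)) : Prop := out = generateSub_alt original collection i
instance (original : List (List Int)) (collection : List (List Int)) (i : Int) (out : List (List Int)) : Decidable (Spec_generateSub original collection i out) := by unfold Spec_generateSub; infer_instance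

-- ===== CLAIM (what is proved, stated in full; the proofs are below) =====
def Claim_equal_generateSub : Prop := ∀ (original : List (List Int)) (collection : List (List Int)) (i : Int), Dom_generateSub original collection i → Pre_generateSub original collection i → Spec_generateSub original collection i (generateSub original collection i)

-- ===== LEMMAS AND PROOFS =====

-- one in-place pop on one item, over Nat index
def gsStrip (j : Nat) (it : List Int) : List Int :=
  if j < it.length then it.take j ++ it.drop (j + 1) else it

-- round-r snapshot, read off the pristine collection
def gsTerm (col : List (List Int)) (j r : Nat) : List (List Int) :=
  (col.filter (fun it => decide (j + r < it.length))).map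
    (fun it => it.take j ++ it.drop (j + r))

-- the tail A appends: k rounds of strip-then-snapshot
def gsT : Nat → List (List Int) → Nat → List (List Int)
  | 0, _, _ => []
  | k+1, col, j =>
    let col' := col.map (gsStrip j)
    col'.filter (fun it => decide (j < it.length)) ++ gsT k col' j

theorem gsFilter_cast (col : List (List Int)) (j : Nat) :
    col.filter (fun it => decide ((j : Int) < (it.length : Int)))
      = col.filter (fun it => decide (j < it.length)) :=
  List.filter_congr (fun it _ => by simp)

theorem gsPop_eq (it : List Int) (j : Nat) (h : j < it.length) :
    gsPop it (j : Int) = it.take j ++ it.drop (j + 1) := by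
  unfold gsPop
  rw [PySem.List.pop?_natCast it j h]
  simp [List.eraseIdx_eq_take_drop_succ]

theorem gsStrip_length_pos (j : Nat) (it : List Int) (h : j < it.length) :
    (gsStrip j it).length = it.length - 1 := by
  simp [gsStrip, h]; omega

theorem gsRound_eq (col : List (List Int)) (j : Nat) :
    gsRound col (j : Int) = (col.all (fun it => decide (it.length ≤ j)), col.map (gsStrip j)) := by
  unfold gsRound
  suffices h : ∀ (b : Bool) (acc : List (List Int)),
      col.foldl (fun st item =>
        if (item.length : Int) > (j : Int) then (false, st.2 ++ [gsPop item (j : Int)])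
        else (st.1, st.2 ++ [item])) (b, acc)
      = (b && col.all (fun it => decide (it.length ≤ j)), acc ++ col.map (gsStrip j)) by
    simpa using h true []
  induction col with
  | nil => simp
  | cons it tl ih =>
    intro b acc
    by_cases h : j < it.length
    · have h' : ((it.length : Int) > (j : Int)) := by exact_mod_cast h
      have hd : ¬ (it.length ≤ j) := by omega
      simp only [List.foldl_cons, if_pos h', ih, List.all_cons, List.map_cons, Prod.mk.injEq]
      exact ⟨by simp [hd], by simp [gsStrip, h, gsPop_eq it j h]⟩
    · have h' : ¬ ((it.length : Int) > (j : Int)) := by omega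
      have hd : (it.length ≤ j) := by omega
      simp only [List.foldl_cons, if_neg h', ih, List.all_cons, List.map_cons, Prod.mk.injEq]
      exact ⟨by simp [hd], by simp [gsStrip, h]⟩

theorem gsClean_eq (col : List (List Int)) (j : Nat) :
    gsClean col (j : Int) = col.filter (fun it => decide (j < it.length)) := by
  unfold gsClean
  rw [← gsFilter_cast]
  suffices h : ∀ acc : List (List Int),
      col.foldl (fun acc item => if (item.length : Int) ≤ (j : Int) then acc else acc ++ [item]) acc
      = acc ++ col.filter (fun it => decide ((j : Int) < (it.length : Int))) by
    simpa using h []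
  induction col with
  | nil => simp
  | cons it tl ih =>
    intro acc
    by_cases h : (j : Int) < (it.length : Int)
    · have h' : ¬ ((it.length : Int) ≤ (j : Int)) := by omega
      rw [List.foldl_cons, if_neg h', ih, List.filter_cons, if_pos (by simpa using h)]
      simp
    · have h' : ((it.length : Int) ≤ (j : Int)) := by omega
      rw [List.foldl_cons, if_pos h', ih, List.filter_cons, if_neg (by simpa using h)]

-- A's recursion computes `orig ++ gsT fuel col j`, for EVERY fuel amount
theorem fuel_eq_T (n : Nat) : ∀ (orig col : List (List Int)) (j : Nat),
    generateSubFuel n orig col (j : Int) = orig ++ gsT n col j := by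
  induction n with
  | zero => intro orig col j; simp [generateSubFuel, gsT]
  | succ n ih =>
    intro orig col j
    show (let st := gsRound col (j : Int);
          let clean := gsClean st.2 (j : Int);
          if st.1 then orig else generateSubFuel n (orig ++ clean) st.2 (j : Int))
        = orig ++ gsT (n+1) col j
    rw [gsRound_eq]
    dsimp only
    rw [gsClean_eq]
    by_cases hb : col.all (fun it => decide (it.length ≤ j))
    · have hid : col.map (gsStrip j) = col := by
        have hmc : col.map (gsStrip j) = col.map id := by
          apply List.map_congr_left
          intro it hit
          have := List.all_eq_true.mp hb it hit
          simp at this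
          simp [gsStrip]; omega
        simpa using hmc
      have hfe : col.filter (fun it => decide (j < it.length)) = [] := by
        apply List.filter_eq_nil_iff.mpr
        intro it hit
        have := List.all_eq_true.mp hb it hit
        simp at this ⊢; omega
      have hT : ∀ k, gsT k col j = [] := by
        intro k
        induction k with
        | zero => simp [gsT]
        | succ k ihk => simp [gsT, hid, hfe, ihk]
      simp [hb, hT]
    · rw [if_neg (by simpa using hb), ih]
      show orig ++ _ ++ _ = _
      rw [List.append_assoc]
      rfl

theorem gsFlatMap_congr {a b : Type} (l : List a) (f g : a → List b)
    (h : ∀ x ∈ l, f x = g x) : l.flatMap f = l.flatMap g := by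
  induction l with
  | nil => rfl
  | cons x t ih =>
    simp only [List.flatMap_cons]
    rw [h x (by simp), ih (fun y hy => h y (by simp [hy]))]

-- filter/map exchange for one strip pass
theorem strip_filter (col : List (List Int)) (j : Nat) :
    (col.map (gsStrip j)).filter (fun it => decide (j < it.length))
      = gsTerm col j 1 := by
  unfold gsTerm
  induction col with
  | nil => simp
  | cons it tl ih =>
    rw [List.map_cons]
    by_cases h1 : j + 1 < it.length
    · have h : j < it.length := by omega
      have hlen := gsStrip_length_pos j it h
      rw [List.filter_cons_of_pos (by simp [hlen]; omega),
          List.filter_cons_of_pos (by simp; omega), ih, List.map_cons]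
      congr 1
      simp [gsStrip, h]
    · by_cases h : j < it.length
      · have hlen := gsStrip_length_pos j it h
        rw [List.filter_cons_of_neg (by simp [hlen]; omega),
            List.filter_cons_of_neg (by simp; omega), ih]
      · have hlen : gsStrip j it = it := by simp [gsStrip, h]
        rw [List.filter_cons_of_neg (by simp [hlen]; omega),
            List.filter_cons_of_neg (by simp; omega), ih]

-- stripping once shifts every later snapshot by one round
theorem term_strip (col : List (List Int)) (j r : Nat) (hr : 1 ≤ r) :
    gsTerm (col.map (gsStrip j)) j r = gsTerm col j (r + 1) := by
  unfold gsTerm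
  induction col with
  | nil => simp
  | cons it tl ih =>
    rw [List.map_cons]
    by_cases h1 : j + (r + 1) < it.length
    · have h : j < it.length := by omega
      have hlen := gsStrip_length_pos j it h
      have hjt : (it.take j).length = j := by simp; omega
      have hcut : (gsStrip j it).take j ++ (gsStrip j it).drop (j + r)
          = it.take j ++ it.drop (j + (r + 1)) := by
        simp only [gsStrip, if_pos h]
        rw [List.take_append, List.drop_append, hjt, List.take_take]
        have hd : (it.take j).drop (j + r) = [] := List.drop_eq_nil_of_le (by omega)
        rw [hd, List.drop_drop]
        have e1 : min j j = j := by omega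
        have e2 : j - j = 0 := by omega
        have e3 : j + 1 + (j + r - j) = j + (r + 1) := by omega
        rw [e1, e2, e3]
        simp
      rw [List.filter_cons_of_pos (by simp [hlen]; omega),
          List.filter_cons_of_pos (by simp; omega)]
      simp only [List.map_cons]
      rw [hcut, ih]
    · by_cases h : j < it.length
      · have hlen := gsStrip_length_pos j it h
        rw [List.filter_cons_of_neg (by simp [hlen]; omega),
            List.filter_cons_of_neg (by simp; omega), ih]
      · have hlen : gsStrip j it = it := by simp [gsStrip, h]
        rw [List.filter_cons_of_neg (by simp [hlen]; omega),
            List.filter_cons_of_neg (by simp; omega), ih]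

-- gsT unrolled into round snapshots of the pristine collection
theorem T_eq_flat (k : Nat) : ∀ (col : List (List Int)) (j : Nat),
    gsT k col j = (List.range k).flatMap (fun t => gsTerm col j (t + 1)) := by
  induction k with
  | zero => intro col j; simp [gsT]
  | succ k ih =>
    intro col j
    show (col.map (gsStrip j)).filter (fun it => decide (j < it.length))
        ++ gsT k (col.map (gsStrip j)) j = _
    rw [strip_filter, ih, List.range_succ_eq_map]
    simp only [List.flatMap_cons, List.flatMap_map]
    congr 1
    apply gsFlatMap_congr
    intro t ht
    exact term_strip col j (t + 1) (by omega)

-- snapshots past the longest row are empty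
theorem term_empty (col : List (List Int)) (j r : Nat) (M : Nat)
    (hM : ∀ it ∈ col, it.length ≤ M) (h : M ≤ j + r) : gsTerm col j r = [] := by
  unfold gsTerm
  have : col.filter (fun it => decide (j + r < it.length)) = [] := by
    apply List.filter_eq_nil_iff.mpr
    intro it hit
    have := hM it hit
    simp; omega
  simp [this]

-- trailing empty snapshots may be dropped
theorem flat_stable (col : List (List Int)) (j B : Nat) (M : Nat)
    (hM : ∀ it ∈ col, it.length ≤ M) (hB : M ≤ j + B + 1) :
    ∀ d, (List.range (B + d)).flatMap (fun t => gsTerm col j (t + 1))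
      = (List.range B).flatMap (fun t => gsTerm col j (t + 1)) := by
  intro d
  induction d with
  | zero => rfl
  | succ d ihd =>
    have hs : B + (d + 1) = (B + d) + 1 := by omega
    rw [hs, List.range_succ]
    simp only [List.flatMap_append, List.flatMap_cons, List.flatMap_nil, List.append_nil]
    rw [ihd, term_empty col j (B + d + 1) M hM (by omega)]
    simp

-- the running maximum of the row lengths
def gsMaxN (col : List (List Int)) : Nat := col.foldr (fun it m => max it.length m) 0

theorem gsMaxN_isMax (col : List (List Int)) : ∀ it ∈ col, it.length ≤ gsMaxN col := by
  induction col with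
  | nil => simp
  | cons x t ih =>
    intro it hit
    rcases List.mem_cons.mp hit with rfl | hmem
    · simp [gsMaxN]
    · exact le_trans (ih it hmem) (by simp only [gsMaxN, List.foldr_cons]; omega)

theorem gsMaxN_le (col : List (List Int)) (c : Int)
    (hall : ∀ it ∈ col, (it.length : Int) ≤ c) (hc : 0 ≤ c) : (gsMaxN col : Int) ≤ c := by
  induction col with
  | nil => simpa [gsMaxN]
  | cons x t ih =>
    have h1 := hall x (by simp)
    have h2 := ih (fun it hit => hall it (by simp [hit]))
    simp only [gsMaxN, List.foldr_cons] at h2 ⊢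
    push_cast
    omega

theorem gsMax?_eq (col : List (List Int)) :
    (match PySem.List.max? (col.map (fun it => (it.length : Int))) (fun x => x) with
     | some m => m
     | none => (0 : Int)) = (gsMaxN col : Int) := by
  cases hm : PySem.List.max? (col.map (fun it => (it.length : Int))) (fun x => x) with
  | none =>
    have : col.map (fun it => (it.length : Int)) = [] := (PySem.List.max?_eq_none_iff _ _).mp hm
    have : col = [] := by simpa using this
    simp [this, gsMaxN]
  | some m =>
    have hmem := PySem.List.max?_mem hm
    have hmax := PySem.List.max?_isMax hm
    obtain ⟨it, hit, hlen⟩ := List.mem_map.mp hmem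
    show m = (gsMaxN col : Int)
    have h1 : (gsMaxN col : Int) ≤ m := by
      apply gsMaxN_le
      · intro it' hit'
        exact hmax _ (List.mem_map.mpr ⟨it', hit', rfl⟩)
      · rw [← hlen]; positivity
    have h2 : m ≤ (gsMaxN col : Int) := by
      rw [← hlen]
      exact_mod_cast gsMaxN_isMax col it hit
    omega

theorem gsSum_shift (col : List (List Int)) : ∀ s : Nat,
    col.foldl (fun s it => s + it.length) s = s + col.foldl (fun s it => s + it.length) 0 := by
  induction col with
  | nil => simp
  | cons x t ih =>
    intro s
    rw [List.foldl_cons, ih, List.foldl_cons, ih (0 + x.length)]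
    omega

theorem gsMaxN_le_sum (col : List (List Int)) :
    gsMaxN col ≤ col.foldl (fun s it => s + it.length) 0 := by
  induction col with
  | nil => simp [gsMaxN]
  | cons x t ih =>
    rw [List.foldl_cons, gsSum_shift]
    simp only [gsMaxN, List.foldr_cons] at ih ⊢
    omega

-- B computes `orig ++` the same round snapshots
theorem alt_eq_flat (orig col : List (List Int)) (j : Nat) :
    generateSub_alt orig col (j : Int)
      = orig ++ (List.range (gsMaxN col - j - 1)).flatMap (fun t => gsTerm col j (t + 1)) := by
  show (PySem.List.pyRange 1 (max ((match PySem.List.max? (col.map (fun it => (it.length : Int))) (fun x => x) with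
     | some m => m
     | none => (0 : Int)) - (j : Int)) 1) 1).foldl _ orig = _
  rw [gsMax?_eq, PySem.List.foldl_append_eq_flatMap, PySem.List.pyRange_one, List.flatMap_map]
  have hN : ((max ((gsMaxN col : Int) - (j : Int)) 1) - 1).toNat = gsMaxN col - j - 1 := by
    rcases le_total ((gsMaxN col : Int) - (j : Int)) 1 with h | h
    · rw [max_eq_right h]; omega
    · rw [max_eq_left h]; omega
  rw [hN]
  congr 1
  apply gsFlatMap_congr
  intro k _
  unfold gsTerm
  have hf : col.filter (fun it => decide ((it.length : Int) > (j : Int) + (1 + (k : Int))))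
      = col.filter (fun it => decide (j + (k + 1) < it.length)) := by
    apply List.filter_congr
    intro it _
    simp only [decide_eq_decide]
    omega
  rw [hf]
  apply List.map_congr_left
  intro it _
  rw [PySem.List.slice_to_natCast]
  have hcast : (j : Int) + (1 + (k : Int)) = ((j + (k + 1) : Nat) : Int) := by push_cast; omega
  rw [hcast, PySem.List.slice_from_natCast]

-- ===== VERDICT (by name: the statement is the Claim_ definition above) =====
theorem generateSub_spec : Claim_equal_generateSub := by
  intro original collection i _ hpre
  unfold Spec_generateSub
  have hpre' : 0 ≤ i := hpre
  obtain ⟨j, rfl⟩ : ∃ j : Nat, i = (j : Int) := ⟨i.toNat, by omega⟩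
  rw [alt_eq_flat]
  show generateSubFuel _ _ _ _ = _
  rw [fuel_eq_T, T_eq_flat]
  congr 1
  have hle : gsMaxN collection - j - 1 ≤ collection.foldl (fun s it => s + it.length) 0 + 1 := by
    have := gsMaxN_le_sum collection
    omega
  have hs : collection.foldl (fun s it => s + it.length) 0 + 1
      = (gsMaxN collection - j - 1) + (collection.foldl (fun s it => s + it.length) 0 + 1 - (gsMaxN collection - j - 1)) := by
    omega
  rw [hs, flat_stable collection j (gsMaxN collection - j - 1) (gsMaxN collection)
    (gsMaxN_isMax collection) (by omega)]
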